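-- pv_equiv track=rewrite | github.com/robertcrowe/Spec4 | src/spec4/agents/_utils.py | _stream_suppressing_json
-- ===== SOURCE A (Python) =====
-- from collections.abc import Generator
--
-- def _stream_suppressing_json(
--     chunks: Generator[str, None, None],
-- ) -> Generator[str, None, None]:
--     """Yield chunks, suppressing the entire response if it starts with a fence.
--
--     When the LLM outputs its final JSON artifact the response begins with ```
--     (possibly after leading whitespace). Suppressing it prevents raw JSON from
--     appearing in the chat window; the caller replaces it via _display_override.
--     """
--     _FENCE = "```"
--     buf = ""
--     flushed = False
--     suppress = False
--     for chunk in chunks: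
--         if flushed:
--             yield chunk
--         elif suppress:
--             pass
--         else:
--             buf += chunk
--             stripped = buf.lstrip()
--             if stripped.startswith(_FENCE):
--                 suppress = True
--             elif len(stripped) >= len(_FENCE):
--                 flushed = True
--                 yield buf
--                 buf = ""
--     if not suppress and not flushed and buf:
--         yield buf
-- ===== SOURCE B (Python) =====
-- from collections.abc import Generator
--
-- def _stream_suppressing_json(
--     chunks: Generator[str, None, None],
-- ) -> Generator[str, None, None]:
--     """Two-phase rewrite: accumulate until a decision, then pass through."""
--     _FENCE = "```"
--     it = iter(chunks)
--     buf = ""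
--     passthrough = False
--     for chunk in it:
--         buf += chunk
--         stripped = buf.lstrip()
--         if stripped.startswith(_FENCE):
--             return  # suppress everything
--         if len(stripped) >= len(_FENCE):
--             passthrough = True
--             break
--     if buf:
--         yield buf
--     if passthrough:
--         yield from it
-- ===== Notes on version B (the rewrite author's own statement) =====
-- stated objective: simpler
-- what changed: Replaces A's two-boolean per-chunk state machine with two explicit phases: a first loop that only accumulates until it can decide (suppress or flush), then a plain pass-through of the remaining iterator.
import Mathlib
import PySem

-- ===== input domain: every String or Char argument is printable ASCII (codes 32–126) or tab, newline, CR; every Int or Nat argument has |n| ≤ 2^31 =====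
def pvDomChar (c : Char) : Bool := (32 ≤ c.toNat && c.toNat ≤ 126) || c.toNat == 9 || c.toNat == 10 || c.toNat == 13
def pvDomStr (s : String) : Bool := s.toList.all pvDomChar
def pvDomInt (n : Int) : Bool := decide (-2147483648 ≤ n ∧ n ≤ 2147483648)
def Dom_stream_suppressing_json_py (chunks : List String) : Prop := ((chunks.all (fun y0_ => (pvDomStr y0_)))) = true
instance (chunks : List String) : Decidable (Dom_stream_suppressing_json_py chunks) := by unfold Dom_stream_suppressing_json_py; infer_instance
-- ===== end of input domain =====

-- B replaces A's two-boolean per-chunk state machine with two explicit phases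
-- (accumulate until a decision, then pass the rest through); same yielded values.

-- ===== PORT A =====
-- A's generator loop: state (buf, flushed, suppress); the returned list is the
-- sequence of yielded values.
def pvALoop : List String → String → Bool → Bool → List String
  | [], buf, flushed, suppress =>
      if !suppress && !flushed && buf ≠ "" then [buf] else []
  | c :: rest, buf, flushed, suppress =>
      if flushed then c :: pvALoop rest buf flushed suppress
      else if suppress then pvALoop rest buf flushed suppress
      else
        let buf' := buf ++ c
        let stripped := PySem.Str.lstrip buf'
        if PySem.Str.startswith stripped "```" then
          pvALoop rest buf' flushed true
        else if PySem.Str.len stripped ≥ 3 then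
          buf' :: pvALoop rest "" true suppress
        else
          pvALoop rest buf' flushed suppress

def stream_suppressing_json_py (chunks : List String) : List String :=
  pvALoop chunks "" false false

-- ===== PORT B =====
-- B's first loop: accumulate buf; none = suppressed (early return),
-- some (buf, passthrough, remaining iterator) otherwise.
def pvBPhase1 : List String → String → Option (String × Bool × List String)
  | [], buf => some (buf, false, [])
  | c :: rest, buf =>
      let buf' := buf ++ c
      let stripped := PySem.Str.lstrip buf'
      if PySem.Str.startswith stripped "```" then none
      else if PySem.Str.len stripped ≥ 3 then some (buf', true, rest)
      else pvBPhase1 rest buf'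

def stream_suppressing_json_py_alt (chunks : List String) : List String :=
  match pvBPhase1 chunks "" with
  | none => []
  | some (buf, passthrough, rest) =>
      (if buf ≠ "" then [buf] else []) ++ (if passthrough then rest else [])

-- ===== PRECONDITION & SPEC =====
def Spec_stream_suppressing_json_py (chunks : List String) (out : List String) : Prop := out = stream_suppressing_json_py_alt chunks
instance (chunks : List String) (out : List String) : Decidable (Spec_stream_suppressing_json_py chunks out) := by unfold Spec_stream_suppressing_json_py; infer_instance

-- ===== CLAIM (what is proved, stated in full; the proofs are below) =====
def Claim_equal_stream_suppressing_json_py : Prop := ∀ (chunks : List String), Dom_stream_suppressing_json_py chunks → Spec_stream_suppressing_json_py chunks (stream_suppressing_json_py chunks)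

-- ===== LEMMAS AND PROOFS =====

-- once suppressed, A yields nothing more
theorem pvALoop_suppressed (rest : List String) (buf : String) :
    pvALoop rest buf false true = [] := by
  induction rest generalizing buf with
  | nil => rfl
  | cons c rest ih => simp [pvALoop, ih]

-- once flushed, A yields every remaining chunk as-is
theorem pvALoop_flushed (rest : List String) (buf : String) :
    pvALoop rest buf true false = rest := by
  induction rest generalizing buf with
  | nil => rfl
  | cons c rest ih => simp [pvALoop, ih]

-- a string whose lstrip has length ≥ 3 is nonempty
theorem pvNe_empty_of_lstrip_len (s : String) (h : 3 ≤ (PySem.Chars.lstrip s.toList).length) :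
    s ≠ "" := by
  rintro rfl
  exact absurd h (by decide)

-- main invariant: A's accumulate phase equals B's phase-1 plus its epilogue
theorem pvMain (chunks : List String) (buf : String) :
    pvALoop chunks buf false false =
      (match pvBPhase1 chunks buf with
       | none => []
       | some (b, p, rest) =>
           (if b ≠ "" then [b] else []) ++ (if p then rest else [])) := by
  induction chunks generalizing buf with
  | nil => simp [pvALoop, pvBPhase1]
  | cons c rest ih =>
      by_cases hf : PySem.Chars.startswith (PySem.Chars.lstrip (buf.toList ++ c.toList)) ['`', '`', '`'] = true
      · simp [pvALoop, pvBPhase1, hf, pvALoop_suppressed]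
      · by_cases hl : 3 ≤ (PySem.Chars.lstrip (buf.toList ++ c.toList)).length
        · have hne : buf ++ c ≠ "" := pvNe_empty_of_lstrip_len _ (by simpa using hl)
          simp [pvALoop, pvBPhase1, hf, hl, pvALoop_flushed, hne]
        · simp [pvALoop, pvBPhase1, hf, hl, ih]

-- ===== VERDICT (by name: the statement is the Claim_ definition above) =====
theorem stream_suppressing_json_py_spec : Claim_equal_stream_suppressing_json_py := by
  intro chunks _
  unfold Spec_stream_suppressing_json_py stream_suppressing_json_py stream_suppressing_json_py_alt
  exact pvMain chunks ""
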